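-- pv_equiv track=rewrite | github.com/a-brandon/practice | edabit/hole_number_sequence.py | sum_of_holes
-- ===== SOURCE A (Python) =====
-- def sum_of_holes(N: int) -> int:
--     holes = {0: 1, 4: 1, 6: 1, 8: 2, 9: 1}
--     total = []
--     for num in range(1, N + 1):
--         arr = list(str(num))
--         for x in arr:
--             if int(x) in holes:
--                 total.append(holes[int(x)])
--     return sum(total)
-- ===== SOURCE B (Python) =====
-- def sum_of_holes(N: int) -> int:
--     holes = (1, 0, 0, 0, 1, 0, 1, 0, 2, 1)
--
--     def hole_digits(n):
--         # hole count of the decimal digits of n (n >= 0); 0 for n == 0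
--         s = 0
--         while n > 0:
--             s += holes[n % 10]
--             n //= 10
--         return s
--
--     def f(n):
--         # sum of hole_digits(k) for k = 1..n, in O(log^2 n)
--         if n <= 0:
--             return 0
--         q, r = divmod(n, 10)
--         return 6 * q + sum(holes[:r + 1]) - 1 + 10 * f(q - 1) + (r + 1) * hole_digits(q)
--
--     return f(N)
-- ===== Notes on version B (the rewrite author's own statement) =====
-- stated objective: faster
-- what changed: Replaces the per-number loop over str(num) digits of every number in 1..N by a digit-position recurrence f(N) = 6*(N//10) + prefix(N%10) - 1 + 10*f(N//10 - 1) + (N%10 + 1)*holes(N//10), computing the total from O(log N) arithmetic steps instead of enumerating all N numbers.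
import Mathlib
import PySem

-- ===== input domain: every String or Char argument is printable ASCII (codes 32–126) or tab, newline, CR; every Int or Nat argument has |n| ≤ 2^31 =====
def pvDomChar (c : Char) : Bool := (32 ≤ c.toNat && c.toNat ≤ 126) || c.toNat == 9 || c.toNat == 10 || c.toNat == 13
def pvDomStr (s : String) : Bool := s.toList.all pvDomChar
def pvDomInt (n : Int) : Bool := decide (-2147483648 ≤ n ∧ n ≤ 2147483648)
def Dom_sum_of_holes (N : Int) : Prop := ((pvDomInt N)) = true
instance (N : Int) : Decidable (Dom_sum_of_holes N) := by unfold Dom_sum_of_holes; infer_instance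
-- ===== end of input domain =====

-- B replaces A's enumeration of every number 1..N by a digit-position recurrence with O(log N) recursion depth.

-- ===== PORT A =====
def sum_of_holes (N : Int) : Int :=
  let holes : PySem.Dict Int Int := PySem.Dict.ofList [(0,1),(4,1),(6,1),(8,2),(9,1)]
  let total : List Int :=
    (PySem.List.pyRange 1 (N+1) 1).foldl (fun total num =>
      let arr := (PySem.Int.toStr num).toList
      arr.foldl (fun total x =>
        -- int(x): ofChars? is none only on a non-digit, unreachable in str(num) for num ≥ 1
        match PySem.Int.ofChars? [x] with
        | some v =>
          if holes.contains v then total ++ [holes.getD v 0] else total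
        | none => total) total) []
  total.sum

-- ===== PORT B =====
def pyHoles : List Int := [1, 0, 0, 0, 1, 0, 1, 0, 2, 1]

-- the 'while n > 0' loop of hole_digits, with its accumulator s (fuel only makes it total; never exhausted for fuel > n)
def holeDigitsGo (fuel : Nat) (s n : Int) : Int :=
  match fuel with
  | 0 => s
  | fuel + 1 =>
    if 0 < n then
      holeDigitsGo fuel (s + PySem.List.pyGetD pyHoles (PySem.Int.mod n 10) 0) (PySem.Int.floordiv n 10)
    else s

def holeDigits (n : Int) : Int := holeDigitsGo (n.toNat + 1) 0 n

-- f of B, recursing on the quotient (fuel only makes it total; never exhausted for fuel > n)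
def fBGo (fuel : Nat) (n : Int) : Int :=
  match fuel with
  | 0 => 0
  | fuel + 1 =>
    if n ≤ 0 then 0
    else
      let q := PySem.Int.floordiv n 10
      let r := PySem.Int.mod n 10
      6 * q + (PySem.List.slice pyHoles none (some (r + 1))).sum - 1
        + 10 * fBGo fuel (q - 1) + (r + 1) * holeDigits q

def sum_of_holes_alt (N : Int) : Int := fBGo (N.toNat + 1) N

-- ===== PRECONDITION & SPEC =====
def Spec_sum_of_holes (N : Int) (out : Int) : Prop := out = sum_of_holes_alt N
instance (N : Int) (out : Int) : Decidable (Spec_sum_of_holes N out) := by unfold Spec_sum_of_holes; infer_instance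

-- ===== CLAIM (what is proved, stated in full; the proofs are below) =====
def Claim_equal_sum_of_holes : Prop := ∀ (N : Int), Dom_sum_of_holes N → Spec_sum_of_holes N (sum_of_holes N)

-- ===== LEMMAS AND PROOFS =====

-- hole value of a single decimal digit
def hval (d : Nat) : Int := pyHoles.getD d 0

-- hole count of the decimal digits of a natural number (0 for 0)
def Hnat (n : Nat) : Int :=
  if n = 0 then 0 else hval (n % 10) + Hnat (n / 10)
termination_by n
decreasing_by exact Nat.div_lt_self (by omega) (by omega)

-- decimal digit characters of n, most significant first (what str(n) produces)
def rep (n : Nat) : List Char :=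
  if n / 10 = 0 then [Nat.digitChar (n % 10)]
  else rep (n / 10) ++ [Nat.digitChar (n % 10)]
termination_by n
decreasing_by exact Nat.div_lt_self (by omega) (by omega)

-- running total: Σ_{k=1}^{m} Hnat k
def G (m : Nat) : Int :=
  match m with
  | 0 => 0
  | m + 1 => G m + Hnat (m + 1)

-- per-character contribution of A's inner loop
def chv (c : Char) : Int :=
  match PySem.Int.ofChars? [c] with
  | some v =>
    if (PySem.Dict.ofList [((0:Int),(1:Int)),(4,1),(6,1),(8,2),(9,1)]).contains v
    then (PySem.Dict.ofList [((0:Int),(1:Int)),(4,1),(6,1),(8,2),(9,1)]).getD v 0 else 0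
  | none => 0

theorem Hnat_zero : Hnat 0 = 0 := by rw [Hnat]; simp

theorem Hnat_pos (n : Nat) (h : n ≠ 0) : Hnat n = hval (n % 10) + Hnat (n / 10) := by
  rw [Hnat, if_neg h]

theorem rep_lo (n : Nat) (h : n / 10 = 0) : rep n = [Nat.digitChar (n % 10)] := by
  rw [rep, if_pos h]

theorem rep_hi (n : Nat) (h : n / 10 ≠ 0) : rep n = rep (n / 10) ++ [Nat.digitChar (n % 10)] := by
  rw [rep]; exact if_neg h

theorem mod10_cast (m : Nat) : PySem.Int.mod (m : Int) 10 = ((m % 10 : Nat) : Int) := by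
  exact_mod_cast PySem.Int.mod_natCast m 10

theorem div10_cast (m : Nat) : PySem.Int.floordiv (m : Int) 10 = ((m / 10 : Nat) : Int) := by
  exact_mod_cast PySem.Int.floordiv_natCast m 10

theorem toDigitsCore_eq_rep (fuel : Nat) : ∀ (n : Nat) (ds : List Char), n < fuel →
    Nat.toDigitsCore 10 fuel n ds = rep n ++ ds := by
  induction fuel with
  | zero => intro n ds h; omega
  | succ f ih =>
    intro n ds h
    rw [Nat.toDigitsCore]
    by_cases h0 : n / 10 = 0
    · simp only [h0, if_pos, rep_lo n h0]
      simp
    · simp only [h0, if_false]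
      have hn : 10 ≤ n := by
        rcases Nat.lt_or_ge n 10 with h' | h'
        · exact absurd (Nat.div_eq_of_lt h') h0
        · exact h'
      have hlt : n / 10 < f := by
        have : n / 10 < n := Nat.div_lt_self (by omega) (by omega)
        omega
      rw [ih _ _ hlt, rep_hi n h0]
      simp

theorem toChars_natCast (m : Nat) : PySem.Int.toChars (m : Int) = rep m := by
  rw [PySem.Int.toChars, if_neg (by omega)]
  simp only [Int.toNat_natCast]
  rw [Nat.toDigits, toDigitsCore_eq_rep (m + 1) m [] (by omega)]
  simp

theorem chv_digitChar (d : Nat) (hd : d < 10) : chv (Nat.digitChar d) = hval d := by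
  interval_cases d <;> decide

theorem S_rep (m : Nat) (hm : 1 ≤ m) : ((rep m).map chv).sum = Hnat m := by
  induction m using Nat.strong_induction_on with
  | _ m ih =>
    rw [Hnat_pos m (by omega)]
    by_cases h0 : m / 10 = 0
    · rw [rep_lo m h0, h0, Hnat_zero]
      simp [chv_digitChar (m % 10) (Nat.mod_lt m (by omega))]
    · have hlt : m / 10 < m := Nat.div_lt_self (by omega) (by omega)
      rw [rep_hi m h0, List.map_append, List.sum_append, ih (m / 10) hlt (by omega)]
      simp [chv_digitChar (m % 10) (Nat.mod_lt m (by omega))]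
      ring

-- A's inner loop, summed
theorem innerSum (cs : List Char) : ∀ (t : List Int),
    (cs.foldl (fun total x =>
        match PySem.Int.ofChars? [x] with
        | some v =>
          if (PySem.Dict.ofList [((0:Int),(1:Int)),(4,1),(6,1),(8,2),(9,1)]).contains v
          then total ++ [(PySem.Dict.ofList [((0:Int),(1:Int)),(4,1),(6,1),(8,2),(9,1)]).getD v 0] else total
        | none => total) t).sum = t.sum + (cs.map chv).sum := by
  induction cs with
  | nil => intro t; simp
  | cons c cs ih =>
    intro t
    simp only [List.foldl_cons, List.map_cons, List.sum_cons, ih]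
    rw [chv]
    cases PySem.Int.ofChars? [c] with
    | none => simp
    | some v =>
      by_cases hc : (PySem.Dict.ofList [((0:Int),(1:Int)),(4,1),(6,1),(8,2),(9,1)]).contains v
      · simp only [hc, if_true, List.sum_append, List.sum_cons, List.sum_nil]
        ring
      · simp [hc]

-- A's outer loop, summed
theorem outerSum (r : List Int) : ∀ (t : List Int),
    ((r.foldl (fun total num =>
      ((PySem.Int.toStr num).toList).foldl (fun total x =>
        match PySem.Int.ofChars? [x] with
        | some v =>
          if (PySem.Dict.ofList [((0:Int),(1:Int)),(4,1),(6,1),(8,2),(9,1)]).contains v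
          then total ++ [(PySem.Dict.ofList [((0:Int),(1:Int)),(4,1),(6,1),(8,2),(9,1)]).getD v 0] else total
        | none => total) total) t).sum)
    = t.sum + (r.map (fun num => (((PySem.Int.toStr num).toList).map chv).sum)).sum := by
  induction r with
  | nil => intro t; simp
  | cons num r ih =>
    intro t
    simp only [List.foldl_cons, List.map_cons, List.sum_cons, ih]
    rw [innerSum]
    ring

theorem range_sum (m : Nat) :
    ((PySem.List.pyRange 1 ((m : Int) + 1) 1).map
      (fun num => (((PySem.Int.toStr num).toList).map chv).sum)).sum = G m := by
  induction m with
  | zero =>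
    rw [PySem.List.pyRange_one_eq_nil (by omega)]
    rfl
  | succ m ih =>
    have hc : ((m + 1 : Nat) : Int) + 1 = ((m : Int) + 1) + 1 := by push_cast; ring
    rw [hc, PySem.List.pyRange_one_succ_right (show (1:Int) ≤ (m : Int) + 1 by omega),
      List.map_append, List.sum_append, ih]
    have hcast : ((m : Int) + 1) = ((m + 1 : Nat) : Int) := by push_cast; ring
    simp only [List.map_cons, List.map_nil, List.sum_cons, List.sum_nil, add_zero]
    rw [hcast, PySem.Int.toList_toStr, toChars_natCast, S_rep (m + 1) (by omega)]
    rfl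

theorem sum_of_holes_eq (m : Nat) : sum_of_holes (m : Int) = G m := by
  rw [sum_of_holes]
  simp only []
  rw [outerSum, range_sum]
  simp

theorem holeDigitsGo_eq (fuel : Nat) : ∀ (m : Nat), m < fuel → ∀ (s : Int),
    holeDigitsGo fuel s (m : Int) = s + Hnat m := by
  induction fuel with
  | zero => intro m h; omega
  | succ fuel ih =>
    intro m h s
    rw [holeDigitsGo]
    by_cases h0 : m = 0
    · subst h0; rw [if_neg (by omega), Hnat_zero]; ring
    · rw [if_pos (by omega), mod10_cast, div10_cast,
        ih (m / 10) (by
          have : m / 10 < m := Nat.div_lt_self (by omega) (by omega)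
          omega), Hnat_pos m h0]
      have hg : PySem.List.pyGetD pyHoles ((m % 10 : Nat) : Int) 0 = hval (m % 10) := by
        rw [PySem.List.pyGetD_natCast]; rfl
      rw [hg]; ring

theorem holeDigits_eq (m : Nat) : holeDigits (m : Int) = Hnat m := by
  rw [holeDigits]
  have ht : ((m : Int)).toNat = m := by omega
  rw [ht, holeDigitsGo_eq (m + 1) m (by omega) 0]
  ring

theorem fBGo_congr (k : Nat) : ∀ (f1 f2 : Nat) (n : Int), n.toNat ≤ k →
    n.toNat < f1 → n.toNat < f2 → fBGo f1 n = fBGo f2 n := by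
  induction k with
  | zero =>
    intro f1 f2 n hk h1 h2
    match f1, f2 with
    | ff1 + 1, ff2 + 1 =>
      rw [fBGo, fBGo]
      rw [if_pos (by omega), if_pos (by omega)]
  | succ k ih =>
    intro f1 f2 n hk h1 h2
    match f1, f2 with
    | ff1 + 1, ff2 + 1 =>
      rw [fBGo, fBGo]
      by_cases hn : n ≤ 0
      · rw [if_pos hn, if_pos hn]
      · rw [if_neg hn, if_neg hn]
        have hq : PySem.Int.floordiv n 10 = n / 10 := PySem.Int.floordiv_eq_ediv_of_pos (by omega)
        have harg : (PySem.Int.floordiv n 10 - 1).toNat ≤ k := by rw [hq]; omega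
        have ha1 : (PySem.Int.floordiv n 10 - 1).toNat < ff1 := by rw [hq]; omega
        have ha2 : (PySem.Int.floordiv n 10 - 1).toNat < ff2 := by rw [hq]; omega
        have hrec := ih ff1 ff2 (PySem.Int.floordiv n 10 - 1) harg ha1 ha2
        simp only [hrec]

-- sum_of_holes_alt unfolded one level, for nonnegative argument
theorem alt_expand (n : Int) (h : 0 ≤ n) :
    sum_of_holes_alt n = 6 * PySem.Int.floordiv n 10
      + (PySem.List.slice pyHoles none (some (PySem.Int.mod n 10 + 1))).sum - 1
      + 10 * sum_of_holes_alt (PySem.Int.floordiv n 10 - 1)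
      + (PySem.Int.mod n 10 + 1) * holeDigits (PySem.Int.floordiv n 10) := by
  by_cases h0 : n = 0
  · subst h0
    have hfd : PySem.Int.floordiv 0 10 = 0 := by decide
    have hmd : PySem.Int.mod 0 10 = 0 := by decide
    have h1 : sum_of_holes_alt (0:Int) = 0 := by decide
    have h2 : sum_of_holes_alt ((0:Int) - 1) = 0 := by decide
    have h3 : holeDigits 0 = 0 := by decide
    rw [hfd, hmd, h1, h2, h3]
    decide
  · rw [sum_of_holes_alt, fBGo, if_neg (by omega)]
    simp only []
    have hq : PySem.Int.floordiv n 10 = n / 10 := PySem.Int.floordiv_eq_ediv_of_pos (by omega)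
    have := fBGo_congr (PySem.Int.floordiv n 10 - 1).toNat n.toNat ((PySem.Int.floordiv n 10 - 1).toNat + 1)
      (PySem.Int.floordiv n 10 - 1) (le_refl _) (by rw [hq]; omega) (by omega)
    rw [this, sum_of_holes_alt]

theorem take_succ_hval (r : Nat) (hr : r < 10) :
    (pyHoles.take (r + 1)).sum = (pyHoles.take r).sum + hval r := by
  interval_cases r <;> decide

theorem slice_take (r : Nat) : (PySem.List.slice pyHoles none (some ((r : Int) + 1))).sum
    = (pyHoles.take (r + 1)).sum := by
  rw [PySem.List.slice_to pyHoles (show (0:Int) ≤ (r : Int) + 1 by omega)]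
  have h : ((r : Int) + 1).toNat = r + 1 := by omega
  rw [h]

theorem fB_delta (m : Nat) (hm : 1 ≤ m) : sum_of_holes_alt (m : Int) = sum_of_holes_alt ((m : Int) - 1) + Hnat m := by
  induction m using Nat.strong_induction_on with
  | _ m ih =>
    have hm1 : ((m : Int) - 1) = ((m - 1 : Nat) : Int) := by omega
    rw [hm1, alt_expand ((m : Nat) : Int) (by omega), alt_expand ((m - 1 : Nat) : Int) (by omega)]
    simp only [mod10_cast, div10_cast]
    have hHm : Hnat m = hval (m % 10) + Hnat (m / 10) := Hnat_pos m (by omega)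
    by_cases hr : 1 ≤ m % 10
    · -- last digit nonzero: the quotient is unchanged by the step m -> m-1
      have e1 : (m - 1) / 10 = m / 10 := by omega
      have e2 : (m - 1) % 10 = m % 10 - 1 := by omega
      rw [e1, e2, holeDigits_eq (m / 10), slice_take (m % 10), slice_take (m % 10 - 1)]
      have e3 : (pyHoles.take (m % 10 + 1)).sum
          = (pyHoles.take (m % 10 - 1 + 1)).sum + hval (m % 10) := by
        have h := take_succ_hval (m % 10) (Nat.mod_lt m (by omega))
        have e : m % 10 - 1 + 1 = m % 10 := by omega
        rw [e]; exact h
      have e4 : ((m % 10 - 1 : Nat) : Int) = ((m % 10 : Nat) : Int) - 1 := by omega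
      rw [e3, e4, hHm]
      ring
    · -- last digit 0: borrow from the quotient
      have hr0 : m % 10 = 0 := by omega
      have hq : 1 ≤ m / 10 := by omega
      have e1 : (m - 1) / 10 = m / 10 - 1 := by omega
      have e2 : (m - 1) % 10 = 9 := by omega
      rw [e1, e2, hr0, holeDigits_eq (m / 10), holeDigits_eq (m / 10 - 1),
        slice_take 0, slice_take 9]
      have key : sum_of_holes_alt (((m / 10 : Nat) : Int) - 1)
          = sum_of_holes_alt (((m / 10 - 1 : Nat) : Int) - 1) + Hnat (m / 10 - 1) := by
        by_cases hq2 : 2 ≤ m / 10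
        · have ec : ((m / 10 : Nat) : Int) - 1 = ((m / 10 - 1 : Nat) : Int) := by omega
          rw [ec]
          exact ih (m / 10 - 1) (by omega) (by omega)
        · have hq1 : m / 10 = 1 := by omega
          rw [hq1]
          have hb0 : sum_of_holes_alt (((1:Nat) : Int) - 1) = 0 := by decide
          have hbm : sum_of_holes_alt (((0:Nat) : Int) - 1) = 0 := by decide
          rw [hb0, hbm, Hnat_zero]
          ring
      have hP0 : ((pyHoles.take (0 + 1)).sum : Int) = 1 := by decide
      have hP9 : ((pyHoles.take (9 + 1)).sum : Int) = 6 := by decide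
      have hv0 : hval 0 = 1 := by decide
      rw [hP0, hP9, hHm, hr0, hv0]
      have hq1c : ((m / 10 - 1 : Nat) : Int) = ((m / 10 : Nat) : Int) - 1 := by omega
      rw [hq1c] at key ⊢
      push_cast at key ⊢
      linarith [key]

theorem alt_eq (m : Nat) : sum_of_holes_alt (m : Int) = G m := by
  induction m with
  | zero => rw [sum_of_holes_alt, fBGo]; simp [G]
  | succ m ih =>
    have h1 : sum_of_holes_alt ((m + 1 : Nat) : Int)
        = sum_of_holes_alt (((m + 1 : Nat) : Int) - 1) + Hnat (m + 1) :=
      fB_delta (m + 1) (by omega)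
    have h2 : (((m + 1 : Nat) : Int) - 1) = (m : Int) := by push_cast; ring
    rw [h1, h2, ih]
    rfl

-- ===== VERDICT (by name: the statement is the Claim_ definition above) =====
theorem sum_of_holes_spec : Claim_equal_sum_of_holes := by
  intro N _hDom
  unfold Spec_sum_of_holes
  by_cases hN : N ≤ 0
  · rw [sum_of_holes_alt, fBGo, if_pos hN, sum_of_holes]
    rw [PySem.List.pyRange_one_eq_nil (by omega)]
    rfl
  · have hm : N = (N.toNat : Int) := by omega
    rw [hm, sum_of_holes_eq, alt_eq]
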